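-- pv_equiv track=rewrite | github.com/danshaes/Cyclic-Character-Mapping-CCMa- | cycle.py | pascalValue
-- ===== SOURCE A (Python) =====
-- import math
--
-- def pascalValue(password):
--     nValue=len(password)
--     rValue=nValue
--     sum=0
--     for value in password:
--         numerator=(math.factorial(nValue))
--         denominator=(math.factorial(nValue - rValue)) * (math.factorial(rValue))
--         comb=numerator//denominator
--         modulo=(ord(value) * comb) % 61
--         rValue-=1
--         sum+=modulo
--     return sum % 61
-- ===== SOURCE B (Python) =====
-- def pascalValue(password):
--     n = len(password)
--     total = 0
--     comb = 1  # C(n, 0); updated incrementally instead of recomputing factorials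
--     for i, ch in enumerate(password):
--         total = (total + ord(ch) * comb) % 61
--         comb = comb * (n - i) // (i + 1)  # C(n, i+1)
--     return total
-- ===== Notes on version B (the rewrite author's own statement) =====
-- stated objective: faster
-- what changed: B replaces the per-character recomputation of three factorials (and a bigint division) by an incrementally updated binomial coefficient C(n,i+1)=C(n,i)*(n-i)//(i+1) and keeps the running sum reduced mod 61 each step.
import Mathlib
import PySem

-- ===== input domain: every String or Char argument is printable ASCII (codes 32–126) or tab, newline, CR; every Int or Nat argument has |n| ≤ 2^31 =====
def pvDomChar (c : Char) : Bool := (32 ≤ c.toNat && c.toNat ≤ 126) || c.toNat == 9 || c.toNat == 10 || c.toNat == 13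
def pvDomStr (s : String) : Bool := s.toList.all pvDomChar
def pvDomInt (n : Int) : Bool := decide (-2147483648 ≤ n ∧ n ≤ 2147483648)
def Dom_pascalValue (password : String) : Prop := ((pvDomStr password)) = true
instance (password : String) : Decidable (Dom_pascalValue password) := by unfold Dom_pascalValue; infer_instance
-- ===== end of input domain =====

-- B is faster: it updates the binomial coefficient incrementally (C(n,i+1)=C(n,i)*(n-i)//(i+1))
-- instead of recomputing three factorials per character, and keeps the running sum reduced mod 61.

-- ===== PORT A =====
def pvStepA (nValue : Int) (st : Int × Int) (value : Char) : Int × Int :=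
  let numerator : Int := (Nat.factorial nValue.toNat : Int)
  let denominator : Int :=
    (Nat.factorial (nValue - st.1).toNat : Int) * (Nat.factorial st.1.toNat : Int)
  let comb := PySem.Int.floordiv numerator denominator
  let modulo := PySem.Int.mod ((value.toNat : Int) * comb) 61
  (st.1 - 1, st.2 + modulo)

def pascalValue (password : String) : Int :=
  let nValue : Int := (password.toList.length : Int)
  let res := password.toList.foldl (pvStepA nValue) (nValue, 0)
  PySem.Int.mod res.2 61

-- ===== PORT B =====
def pvStepB (n : Int) (st : Int × Int × Int) (ch : Char) : Int × Int × Int :=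
  let total := PySem.Int.mod (st.2.2 + (ch.toNat : Int) * st.2.1) 61
  let comb := PySem.Int.floordiv (st.2.1 * (n - st.1)) (st.1 + 1)
  (st.1 + 1, comb, total)

def pascalValue_alt (password : String) : Int :=
  let n : Int := (password.toList.length : Int)
  (password.toList.foldl (pvStepB n) (0, 1, 0)).2.2

-- ===== PRECONDITION & SPEC =====
def Spec_pascalValue (password : String) (out : Int) : Prop := out = pascalValue_alt password
instance (password : String) (out : Int) : Decidable (Spec_pascalValue password out) := by unfold Spec_pascalValue; infer_instance

-- ===== CLAIM (what is proved, stated in full; the proofs are below) =====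
def Claim_equal_pascalValue : Prop := ∀ (password : String), Dom_pascalValue password → Spec_pascalValue password (pascalValue password)

-- ===== LEMMAS AND PROOFS =====

-- reference sum: Σ over the characters, starting at column k, of (ord c * C(n,k)) % 61
def pvSum (n : Nat) : List Char → Nat → Int
  | [], _ => 0
  | c :: t, k => PySem.Int.mod ((c.toNat : Int) * (Nat.choose n k : Int)) 61 + pvSum n t (k + 1)

theorem pvChooseFloordiv (n k : Nat) (h : k ≤ n) :
    PySem.Int.floordiv ((Nat.factorial n : Nat) : Int)
      ((Nat.factorial k : Int) * (Nat.factorial (n - k) : Int)) = (Nat.choose n k : Int) := by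
  have : ((Nat.factorial k : Int) * (Nat.factorial (n - k) : Int))
      = ((Nat.factorial k * Nat.factorial (n - k) : Nat) : Int) := by push_cast; ring
  rw [this, PySem.Int.floordiv_natCast]
  norm_cast
  exact (Nat.choose_eq_factorial_div_factorial h).symm

theorem pvLoopA (n : Nat) (l : List Char) (k : Nat) (s : Int) (h : k + l.length = n) :
    l.foldl (pvStepA (n : Int)) (((n : Int) - k), s)
      = ((n : Int) - (k + l.length), s + pvSum n l k) := by
  induction l generalizing k s with
  | nil => simp [pvSum]
  | cons c t ih =>
    have hk : k < n := by simp at h; omega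
    have h1 : ((n : Int) - ((n : Int) - k)).toNat = k := by omega
    have h2 : ((n : Int) - (k : Int)).toNat = n - k := by omega
    have h3 : ((n : Int)).toNat = n := by omega
    simp only [List.foldl, pvStepA, h3]
    rw [show (n : Int) - ((n : Int) - (k : Int)) = ((k : Int)) by ring]
    have h4 : ((k : Int)).toNat = k := by omega
    rw [h4, h2, pvChooseFloordiv n k (le_of_lt hk)]
    have h5 : (n : Int) - (k : Int) - 1 = (n : Int) - ((k + 1 : Nat) : Int) := by push_cast; ring
    rw [h5, ih (k + 1) _ (by simp at h ⊢; omega)]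
    simp [pvSum]
    constructor
    · ring
    · ring

theorem pvLoopB (n : Nat) (l : List Char) (k : Nat) (t : Int) (h : k + l.length = n)
    (ht0 : 0 ≤ t) (ht1 : t < 61) :
    (l.foldl (pvStepB (n : Int)) ((k : Int), (Nat.choose n k : Int), t)).2.2
      = PySem.Int.mod (t + pvSum n l k) 61 := by
  induction l generalizing k t with
  | nil =>
    simp only [List.foldl, pvSum]
    rw [PySem.Int.mod_eq_emod_of_pos (by norm_num : (0:Int) < 61)]
    omega
  | cons c t' ih =>
    have hk : k < n := by simp at h; omega
    simp only [List.foldl, pvStepB]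
    -- the updated comb is C(n, k+1)
    have hcomb : PySem.Int.floordiv ((Nat.choose n k : Int) * ((n : Int) - (k : Int))) ((k : Int) + 1)
        = (Nat.choose n (k + 1) : Int) := by
      have hsub : (n : Int) - (k : Int) = ((n - k : Nat) : Int) := by omega
      have hone : ((k : Int) + 1) = ((k + 1 : Nat) : Int) := by push_cast; ring
      rw [hsub, hone,
        show ((Nat.choose n k : Int) * ((n - k : Nat) : Int)) = ((Nat.choose n k * (n - k) : Nat) : Int) by push_cast; ring,
        PySem.Int.floordiv_natCast, ← Nat.choose_succ_right_eq, Nat.mul_div_cancel _ (Nat.succ_pos k)]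
    have hone' : ((k : Int) + 1) = ((k + 1 : Nat) : Int) := by push_cast; ring
    rw [hcomb, hone', ih (k + 1)
      (PySem.Int.mod (t + (c.toNat : Int) * (Nat.choose n k : Int)) 61)
      (by simp at h ⊢; omega)
      (PySem.Int.mod_nonneg _ (by norm_num))
      (PySem.Int.mod_lt _ (by norm_num))]
    simp only [pvSum]
    rw [PySem.Int.mod_eq_emod_of_pos (by norm_num), PySem.Int.mod_eq_emod_of_pos (by norm_num),
        PySem.Int.mod_eq_emod_of_pos (by norm_num), PySem.Int.mod_eq_emod_of_pos (by norm_num)]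
    omega

-- ===== VERDICT (by name: the statement is the Claim_ definition above) =====
theorem pascalValue_spec : Claim_equal_pascalValue := by
  intro password _
  unfold Spec_pascalValue
  set l := password.toList with hl
  set n := l.length with hn
  have hA := pvLoopA n l 0 0 (by omega)
  have hB := pvLoopB n l 0 0 (by omega) le_rfl (by norm_num)
  simp only [Nat.cast_zero, sub_zero, zero_add] at hA hB
  simp only [Nat.choose_zero_right, Nat.cast_one] at hB
  rw [show pascalValue password = PySem.Int.mod (l.foldl (pvStepA (n : Int)) ((n : Int), 0)).2 61 from rfl,
      show pascalValue_alt password = (l.foldl (pvStepB (n : Int)) (0, 1, 0)).2.2 from rfl, hA, hB]
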